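-- pv_equiv track=rewrite | github.com/rtv313/CrackindCodeInterview | Chapter1/1_5OneWay.py | create_dic_set
-- ===== SOURCE A (Python) =====
-- def create_dic_set(string):
--     dictionary = dict()
--     set_chars = set()
--     for char in string:
--         set_chars.add(char)
--         if char in dictionary:
--             dictionary[char] += 1
--         else:
--             dictionary[char] = 1
--
--     return dictionary, set_chars
-- ===== SOURCE B (Python) =====
-- def create_dic_set(string):
--     # B: staged passes — first the distinct characters in first-occurrence order,
--     # then one count per distinct character; no incremental updates in a loop.
--     chars = list(string)
--     distinct = list(dict.fromkeys(chars))
--     dictionary = {ch: chars.count(ch) for ch in distinct}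
--     return dictionary, set(distinct)
-- ===== Notes on version B (the rewrite author's own statement) =====
-- stated objective: alternative
-- what changed: B replaces A's single incremental pass (per-character dict increments plus set.add) by staged passes: it first computes the distinct characters in first-occurrence order with dict.fromkeys, then builds the dict by counting each distinct character over the whole string with list.count, and the set is that distinct list.
import Mathlib
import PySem

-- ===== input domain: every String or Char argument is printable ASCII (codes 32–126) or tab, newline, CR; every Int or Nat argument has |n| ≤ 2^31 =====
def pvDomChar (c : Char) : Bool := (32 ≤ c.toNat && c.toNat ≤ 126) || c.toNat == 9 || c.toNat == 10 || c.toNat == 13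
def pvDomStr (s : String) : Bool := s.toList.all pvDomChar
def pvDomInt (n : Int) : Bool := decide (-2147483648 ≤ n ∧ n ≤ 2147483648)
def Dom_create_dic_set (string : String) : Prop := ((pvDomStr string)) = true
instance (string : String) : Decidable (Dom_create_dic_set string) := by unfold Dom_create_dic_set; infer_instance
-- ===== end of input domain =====

-- B computes the distinct characters first (dict.fromkeys), then one list.count per distinct character, instead of A's incremental dict/set pass (alternative decomposition, not faster).


-- ===== PORT A =====
-- loop over the characters carrying (dictionary, set_chars); a Python char is a 1-char String
def create_dic_set (string : String) : (List (String × Int)) × List String :=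
  let r := string.toList.foldl
    (fun (st : PySem.Dict String Int × PySem.Set String) c =>
      (if st.1.contains (String.ofList [c]) then
         st.1.insert (String.ofList [c]) (st.1.getD (String.ofList [c]) 0 + 1)
       else
         st.1.insert (String.ofList [c]) 1,
       PySem.Set.add st.2 (String.ofList [c])))
    (PySem.Dict.empty, PySem.Set.empty)
  (r.1.items, r.2)

-- ===== PORT B =====
-- chars = list(string); distinct = list(dict.fromkeys(chars)); dict comprehension with chars.count per key; set(distinct)
def create_dic_set_alt (string : String) : (List (String × Int)) × List String :=
  let chars := string.toList.map (fun c => String.ofList [c])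
  let distinct := PySem.List.dedup chars
  let d := distinct.foldl
    (fun (d : PySem.Dict String Int) ch => d.insert ch ((PySem.List.count chars ch : Int)))
    PySem.Dict.empty
  (d.items, PySem.Set.ofList distinct)

-- ===== PRECONDITION & SPEC =====
def Spec_create_dic_set (string : String) (out : (List (String × Int)) × List String) : Prop := out = create_dic_set_alt string
instance (string : String) (out : (List (String × Int)) × List String) : Decidable (Spec_create_dic_set string out) := by unfold Spec_create_dic_set; infer_instance

-- ===== CLAIM (what is proved, stated in full; the proofs are below) =====
def Claim_equal_create_dic_set : Prop := ∀ (string : String), Dom_create_dic_set string → Spec_create_dic_set string (create_dic_set string)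

-- ===== LEMMAS AND PROOFS =====

-- A's branch on membership is the same dict update as an unconditional get-based insert.
theorem dic_step_eq (d : PySem.Dict String Int) (k : String) :
    (if d.contains k then d.insert k (d.getD k 0 + 1) else d.insert k 1)
      = d.insert k (d.getD k 0 + 1) := by
  by_cases h : d.contains k = true
  · simp [h]
  · simp [h, PySem.Dict.getD_of_not_contains d 0 (by simpa using h)]

theorem create_dic_set_eq_alt (string : String) :
    create_dic_set string = create_dic_set_alt string := by
  unfold create_dic_set create_dic_set_alt
  have hstep :
      (fun (st : PySem.Dict String Int × PySem.Set String) c =>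
        (if st.1.contains (String.ofList [c]) then
           st.1.insert (String.ofList [c]) (st.1.getD (String.ofList [c]) 0 + 1)
         else
           st.1.insert (String.ofList [c]) 1,
         PySem.Set.add st.2 (String.ofList [c])))
      = (fun (st : PySem.Dict String Int × PySem.Set String) c =>
        ((fun (d : PySem.Dict String Int) c =>
            d.insert (String.ofList [c]) (d.getD (String.ofList [c]) 0 + 1)) st.1 c,
         (fun (s : PySem.Set String) c => PySem.Set.add s (String.ofList [c])) st.2 c)) := by
    funext st c
    simp [dic_step_eq]
  have hd : string.toList.foldl
      (fun (d : PySem.Dict String Int) c => d.insert (String.ofList [c]) (d.getD (String.ofList [c]) 0 + 1))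
      PySem.Dict.empty
      = PySem.Dict.counter (string.toList.map (fun c => String.ofList [c])) := by
    rw [← PySem.Dict.foldl_insert_getD_add_one_eq_counter, List.foldl_map]
  have hs : string.toList.foldl
      (fun (s : PySem.Set String) c => PySem.Set.add s (String.ofList [c])) PySem.Set.empty
      = PySem.Set.ofList (string.toList.map (fun c => String.ofList [c])) := by
    rw [← PySem.Set.update_map_eq_foldl_add]
    exact PySem.Set.update_nil_left _
  simp only [hstep]
  rw [PySem.List.foldl_prod_mk
        (fun (d : PySem.Dict String Int) c => d.insert (String.ofList [c]) (d.getD (String.ofList [c]) 0 + 1))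
        (fun (s : PySem.Set String) c => PySem.Set.add s (String.ofList [c])),
      hd, hs]
  -- B's fresh-key insert loop appends its pairs; A's counter items are exactly those pairs
  set chars := string.toList.map (fun c => String.ofList [c]) with hchars
  have hfresh :
      ((PySem.List.dedup chars).foldl
        (fun (d : PySem.Dict String Int) ch => d.insert ch ((PySem.List.count chars ch : Int)))
        PySem.Dict.empty).items
      = (PySem.List.dedup chars).map (fun ch => (ch, (PySem.List.count chars ch : Int))) := by
    have := PySem.Dict.items_foldl_insert_fresh (l := PySem.List.dedup chars)
      (k := fun ch => ch) (v := fun ch => (PySem.List.count chars ch : Int))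
      (d := PySem.Dict.empty)
      (by intro a _; simp [PySem.Dict.contains_empty])
      (by simp [PySem.List.nodup_dedup])
    simpa using this
  simp only [PySem.List.dedup_eq_ofList, PySem.List.count_eq] at hfresh
  simp [hfresh, PySem.Dict.items_counter, PySem.List.dedup_eq_ofList,
    PySem.List.count_eq, PySem.Set.ofList_eq_self_of_nodup _ (PySem.Set.nodup_ofList _)]

-- ===== VERDICT (by name: the statement is the Claim_ definition above) =====
theorem create_dic_set_spec : Claim_equal_create_dic_set := by
  intro s _
  unfold Spec_create_dic_set
  exact create_dic_set_eq_alt s
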